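-- pv_equiv track=rewrite | github.com/ICST-AI-Delivery/idcevo-ta-iop-configuration | BMW_IDCevo_IOP_Test_script_generator/demo_app.py | clean_generated_script
-- ===== SOURCE A (Python) =====
-- def clean_generated_script(script_content):
--     """Clean generated script to remove unwanted headers and comments"""
--
--     if not script_content or not script_content.strip():
--         return script_content
--
--     lines = script_content.split('\n')
--     cleaned_lines = []
--     skip_header = True
--
--     for line in lines:
--         stripped_line = line.strip()
--
--         # Skip header comments at the beginning
--         if skip_header:
--             # Skip lines that are part of header comments
--             if (stripped_line.startswith('"""') or
--                 stripped_line.startswith("'''") or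
--                 stripped_line.startswith('AI-Generated') or
--                 stripped_line.startswith('Generated on') or
--                 stripped_line.startswith('Test Case Information') or
--                 stripped_line.startswith('- Precondition:') or
--                 stripped_line.startswith('- Description:') or
--                 stripped_line.startswith('- Expected Result:') or
--                 stripped_line.startswith('- Script Description:') or
--                 stripped_line == '"""' or
--                 stripped_line == "'''"):
--                 continue
--             elif stripped_line.startswith('from ') or stripped_line.startswith('import '):
--                 # Found the actual code start
--                 skip_header = False
--                 cleaned_lines.append(line)
--             elif not stripped_line:  # Empty line
--                 continue
--             else:
--                 # Non-import line found, stop skipping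
--                 skip_header = False
--                 cleaned_lines.append(line)
--         else:
--             cleaned_lines.append(line)
--
--     return '\n'.join(cleaned_lines)
-- ===== SOURCE B (Python) =====
-- HEADER_PREFIXES = ('"""', "'''", 'AI-Generated', 'Generated on',
--                    'Test Case Information', '- Precondition:', '- Description:',
--                    '- Expected Result:', '- Script Description:')
--
--
-- def _is_header(line):
--     stripped = line.strip()
--     return not stripped or stripped.startswith(HEADER_PREFIXES)
--
--
-- def clean_generated_script(script_content):
--     """Clean generated script to remove unwanted headers and comments"""
--     if not script_content or not script_content.strip():
--         return script_content
--     lines = script_content.split('\n')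
--     # Walk the lines from the END: build the reversed line list back-to-front
--     # and remember how many trailing lines to keep (the suffix starting at the
--     # last non-header line seen, i.e. the first one from the left).
--     rev = []
--     keep = 0
--     for line in reversed(lines):
--         rev.append(line)
--         if not _is_header(line):
--             keep = len(rev)
--     kept = rev[:keep]
--     kept.reverse()
--     return '\n'.join(kept)
-- ===== Notes on version B (the rewrite author's own statement) =====
-- stated objective: alternative
-- what changed: Replaces A's left-to-right skip_header-flag loop with an append accumulator by a right-to-left traversal that builds the reversed line list back-to-front and records a last-non-header-wins keep length, then slices, reverses and joins.
import Mathlib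
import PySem

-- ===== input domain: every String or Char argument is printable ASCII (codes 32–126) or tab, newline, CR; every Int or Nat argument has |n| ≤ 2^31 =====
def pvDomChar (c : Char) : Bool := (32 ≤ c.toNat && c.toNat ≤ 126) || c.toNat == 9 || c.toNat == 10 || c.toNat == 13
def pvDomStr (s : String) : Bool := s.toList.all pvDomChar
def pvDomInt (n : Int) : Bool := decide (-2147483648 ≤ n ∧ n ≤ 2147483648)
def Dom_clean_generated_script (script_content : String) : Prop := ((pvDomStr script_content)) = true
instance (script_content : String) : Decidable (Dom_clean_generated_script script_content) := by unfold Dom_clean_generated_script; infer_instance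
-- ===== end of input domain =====

-- B replaces A's left-to-right skip_header flag + append loop by a right-to-left pass that
-- builds the reversed line list back-to-front with a last-non-header-wins keep length,
-- then slices, reverses and joins; same cost, different traversal and output construction.

-- ===== PORT A =====
-- the loop body of A's for-loop, state = (cleaned_lines, skip_header)
def pvStepA (st : List String × Bool) (line : String) : List String × Bool :=
  let cleaned_lines := st.1
  let skip_header := st.2
  let stripped_line := PySem.Str.strip line
  if skip_header then
    if (PySem.Str.startswith stripped_line "\"\"\"" ||
        PySem.Str.startswith stripped_line "'''" ||
        PySem.Str.startswith stripped_line "AI-Generated" ||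
        PySem.Str.startswith stripped_line "Generated on" ||
        PySem.Str.startswith stripped_line "Test Case Information" ||
        PySem.Str.startswith stripped_line "- Precondition:" ||
        PySem.Str.startswith stripped_line "- Description:" ||
        PySem.Str.startswith stripped_line "- Expected Result:" ||
        PySem.Str.startswith stripped_line "- Script Description:" ||
        stripped_line == "\"\"\"" ||
        stripped_line == "'''") then
      (cleaned_lines, skip_header)
    else if PySem.Str.startswith stripped_line "from " || PySem.Str.startswith stripped_line "import " then
      (cleaned_lines ++ [line], false)
    else if stripped_line == "" then
      (cleaned_lines, skip_header)
    else
      (cleaned_lines ++ [line], false)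
  else
    (cleaned_lines ++ [line], false)

def clean_generated_script (script_content : String) : String :=
  if script_content == "" || PySem.Str.strip script_content == "" then
    script_content
  else
    let lines := (PySem.Str.split? script_content "\n").getD []   -- sep "\n" ≠ "": getD never fires
    let st := lines.foldl pvStepA ([], true)
    PySem.Str.join "\n" st.1

-- ===== PORT B =====
-- Source B's _is_header: empty after strip, or starts with one of the header prefixes
def pvIsHeader (line : String) : Bool :=
  let stripped := PySem.Str.strip line
  stripped == "" ||
  PySem.Str.startswith stripped "\"\"\"" ||
  PySem.Str.startswith stripped "'''" ||
  PySem.Str.startswith stripped "AI-Generated" ||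
  PySem.Str.startswith stripped "Generated on" ||
  PySem.Str.startswith stripped "Test Case Information" ||
  PySem.Str.startswith stripped "- Precondition:" ||
  PySem.Str.startswith stripped "- Description:" ||
  PySem.Str.startswith stripped "- Expected Result:" ||
  PySem.Str.startswith stripped "- Script Description:"

-- Source B's backwards loop body, state = (rev, keep)
def pvStepB (st : List String × Nat) (line : String) : List String × Nat :=
  let rev := st.1 ++ [line]
  (rev, if pvIsHeader line then st.2 else rev.length)

def clean_generated_script_alt (script_content : String) : String :=
  if script_content == "" || PySem.Str.strip script_content == "" then
    script_content
  else
    let lines := (PySem.Str.split? script_content "\n").getD []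
    let st := lines.reverse.foldl pvStepB ([], 0)
    PySem.Str.join "\n" ((st.1.take st.2).reverse)

-- ===== PRECONDITION & SPEC =====
def Spec_clean_generated_script (script_content : String) (out : String) : Prop := out = clean_generated_script_alt script_content
instance (script_content : String) (out : String) : Decidable (Spec_clean_generated_script script_content out) := by unfold Spec_clean_generated_script; infer_instance

-- ===== CLAIM (what is proved, stated in full; the proofs are below) =====
def Claim_equal_clean_generated_script : Prop := ∀ (script_content : String), Dom_clean_generated_script script_content → Spec_clean_generated_script script_content (clean_generated_script script_content)

-- ===== LEMMAS AND PROOFS =====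

-- proof-side characterisation: the suffix from the first non-header line
def pvTailFromCode : List String → List String
  | [] => []
  | line :: rest => if pvIsHeader line then pvTailFromCode rest else line :: rest

-- a string equal to t starts with t
lemma pv_sw_of_eq (s t : String) (h : (s == t) = true) : PySem.Str.startswith s t = true := by
  rw [beq_iff_eq] at h; subst h
  simp [PySem.Str.startswith_eq, PySem.Chars.startswith_iff]

lemma pvStepA_header (acc : List String) (l : String) (h : pvIsHeader l = true) :
    pvStepA (acc, true) l = (acc, true) := by
  unfold pvIsHeader at h
  unfold pvStepA
  simp only at h ⊢
  by_cases he : (PySem.Str.strip l == "") = true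
  · rw [beq_iff_eq] at he
    rw [he]
    simp [PySem.Chars.startswith_iff]
  · rw [Bool.not_eq_true] at he
    rw [he] at h
    simp only [Bool.false_or] at h
    rw [h]
    simp

lemma pvStepA_nonheader (acc : List String) (l : String) (h : pvIsHeader l = false) :
    pvStepA (acc, true) l = (acc ++ [l], false) := by
  unfold pvIsHeader at h
  unfold pvStepA
  simp only [Bool.or_eq_false_iff] at h
  obtain ⟨⟨⟨⟨⟨⟨⟨⟨⟨he, h1⟩, h2⟩, h3⟩, h4⟩, h5⟩, h6⟩, h7⟩, h8⟩, h9⟩ := h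
  have hq1 : (PySem.Str.strip l == "\"\"\"") = false := by
    rw [Bool.eq_false_iff]; intro hc; rw [pv_sw_of_eq _ _ hc] at h1; exact absurd h1 (by simp)
  have hq2 : (PySem.Str.strip l == "'''") = false := by
    rw [Bool.eq_false_iff]; intro hc; rw [pv_sw_of_eq _ _ hc] at h2; exact absurd h2 (by simp)
  simp only [h1, h2, h3, h4, h5, h6, h7, h8, h9, he, hq1, hq2, Bool.or_false,
    if_true, if_false, Bool.false_eq_true]
  split <;> rfl

-- once skip_header is False, A's loop just appends every remaining line
lemma pv_foldl_false (ls : List String) (acc : List String) :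
    ls.foldl pvStepA (acc, false) = (acc ++ ls, false) := by
  induction ls generalizing acc with
  | nil => simp
  | cons l ls ih =>
    simp only [List.foldl_cons]
    have : pvStepA (acc, false) l = (acc ++ [l], false) := rfl
    rw [this, ih]
    simp

-- A's loop from the initial state produces the accumulator ++ the suffix from first code line
lemma pv_foldl_true (ls : List String) (acc : List String) :
    (ls.foldl pvStepA (acc, true)).1 = acc ++ pvTailFromCode ls := by
  induction ls generalizing acc with
  | nil => simp [pvTailFromCode]
  | cons l ls ih =>
    simp only [List.foldl_cons]
    by_cases hh : pvIsHeader l = true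
    · rw [pvStepA_header acc l hh, ih, pvTailFromCode, if_pos hh]
    · rw [Bool.not_eq_true] at hh
      rw [pvStepA_nonheader acc l hh, pv_foldl_false, pvTailFromCode, if_neg (by simp [hh])]
      simp

-- the tail is a suffix of the lines
lemma pvTail_suffix (ls : List String) : (pvTailFromCode ls) <:+ ls := by
  induction ls with
  | nil => simp [pvTailFromCode]
  | cons l ls ih =>
    rw [pvTailFromCode]
    split
    · exact ih.trans (List.suffix_cons l ls)
    · exact List.suffix_refl _

-- B's backwards loop: rev ends as the reversed lines, keep as the tail's length
lemma pv_foldl_B (ls : List String) :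
    ls.reverse.foldl pvStepB ([], 0) = (ls.reverse, (pvTailFromCode ls).length) := by
  induction ls with
  | nil => simp [pvTailFromCode]
  | cons l ls ih =>
    rw [List.reverse_cons, List.foldl_append, ih]
    simp only [List.foldl_cons, List.foldl_nil, pvStepB, pvTailFromCode]
    by_cases hh : pvIsHeader l = true
    · simp [hh]
    · rw [Bool.not_eq_true] at hh
      simp [hh]

-- taking the tail's length from the reversed lines gives the reversed tail
lemma pv_take_rev (ls : List String) :
    (ls.reverse.take (pvTailFromCode ls).length).reverse = pvTailFromCode ls := by
  obtain ⟨pre, hpre⟩ := pvTail_suffix ls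
  set t := pvTailFromCode ls with ht
  rw [← hpre, List.reverse_append, List.take_left' (by simp), List.reverse_reverse]

-- ===== VERDICT (by name: the statement is the Claim_ definition above) =====
theorem clean_generated_script_spec : Claim_equal_clean_generated_script := by
  intro s _
  unfold Spec_clean_generated_script clean_generated_script clean_generated_script_alt
  split
  · rfl
  · show PySem.Str.join "\n" ((((PySem.Str.split? s "\n").getD []).foldl pvStepA ([], true)).1) = _
    rw [pv_foldl_true]
    show _ = PySem.Str.join "\n" (List.take (((PySem.Str.split? s "\n").getD []).reverse.foldl pvStepB ([], 0)).2 (((PySem.Str.split? s "\n").getD []).reverse.foldl pvStepB ([], 0)).1).reverse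
    rw [pv_foldl_B]
    show _ = PySem.Str.join "\n" ((((PySem.Str.split? s "\n").getD []).reverse.take (pvTailFromCode ((PySem.Str.split? s "\n").getD [])).length).reverse)
    rw [pv_take_rev]
    simp
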